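-- pv_equiv track=rewrite | github.com/DevThib/Blokus-ENAC | variation.py | jouable
-- ===== SOURCE A (Python) =====
-- def voisins(version):
--     s=set()
--     for e in version:
--         a,b=e
--         if (a,b-1) not in version:
--             s.add((a,b-1))
--         if (a,b+1) not in version:
--             s.add((a,b+1))
--         if (a-1,b) not in version:
--             s.add((a-1,b))
--         if (a+1,b) not in version:
--             s.add((a+1,b))
--         if (a-1,b-1) not in version:
--             s.add((a-1,b-1))
--         if (a-1,b+1) not in version:
--             s.add((a-1,b+1))
--         if (a+1,b-1) not in version:
--             s.add((a+1,b-1))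
--         if (a+1,b+1) not in version:
--              s.add((a+1,b+1))
--     return s
--
-- def jouable(version):
--     l=voisins(version)
--     c=[]
--     for e in l:
--         a,b=e
--         if (a-1,b) in version:
--             c.append(e)
--         elif (a+1,b) in version:
--            c.append(e)
--         elif (a,b-1) in version:
--             c.append(e)
--         elif (a,b+1) in version:
--             c.append(e)
--     for i in c:
--         l.discard(i)
--     return l
-- ===== SOURCE B (Python) =====
-- def _diag_ok(version, d):
--     x, y = d
--     return (d not in version
--             and (x - 1, y) not in version
--             and (x + 1, y) not in version
--             and (x, y - 1) not in version
--             and (x, y + 1) not in version)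
--
-- def jouable(version):
--     res = set()
--     for (a, b) in version:
--         for d in ((a - 1, b - 1), (a - 1, b + 1), (a + 1, b - 1), (a + 1, b + 1)):
--             if _diag_ok(version, d):
--                 res.add(d)
--     return res
-- ===== Notes on version B (the rewrite author's own statement) =====
-- stated objective: simpler
-- what changed: B builds the answer set directly in one pass over version, generating only the four diagonal offsets per cell and adding a candidate iff it and its four orthogonal neighbors are all outside version, instead of A's build-all-8-neighbors set followed by a collect-then-discard filtering pass.
import Mathlib
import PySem

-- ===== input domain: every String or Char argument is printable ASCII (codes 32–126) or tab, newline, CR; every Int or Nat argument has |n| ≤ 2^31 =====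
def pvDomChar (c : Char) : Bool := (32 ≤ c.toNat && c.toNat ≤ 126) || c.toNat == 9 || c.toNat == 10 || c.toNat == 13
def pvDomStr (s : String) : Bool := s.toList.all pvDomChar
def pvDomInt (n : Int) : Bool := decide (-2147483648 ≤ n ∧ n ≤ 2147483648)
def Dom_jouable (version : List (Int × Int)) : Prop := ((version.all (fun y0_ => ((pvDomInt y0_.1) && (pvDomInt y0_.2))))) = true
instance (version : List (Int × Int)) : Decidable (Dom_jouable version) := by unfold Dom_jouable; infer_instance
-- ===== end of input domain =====

-- B replaces A's build-all-8-neighbors set + collect-then-discard passes by one direct pass that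
-- adds only the qualifying diagonal candidates (objective: simpler; same results, same set order).
-- A's final 'for e in l' loops read a Python set, but their combined effect (the returned set) is
-- iteration-order independent, so modelling the set by its insertion-order list is faithful.

-- ===== PORT A =====
-- loop body of the 'for e in version' loop of voisins
def voisinsStep (version : List (Int × Int)) (s : PySem.Set (Int × Int)) (e : Int × Int) :
    PySem.Set (Int × Int) :=
  let a := e.1
  let b := e.2
  let s := if (a, b - 1) ∈ version then s else PySem.Set.add s (a, b - 1)
  let s := if (a, b + 1) ∈ version then s else PySem.Set.add s (a, b + 1)
  let s := if (a - 1, b) ∈ version then s else PySem.Set.add s (a - 1, b)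
  let s := if (a + 1, b) ∈ version then s else PySem.Set.add s (a + 1, b)
  let s := if (a - 1, b - 1) ∈ version then s else PySem.Set.add s (a - 1, b - 1)
  let s := if (a - 1, b + 1) ∈ version then s else PySem.Set.add s (a - 1, b + 1)
  let s := if (a + 1, b - 1) ∈ version then s else PySem.Set.add s (a + 1, b - 1)
  let s := if (a + 1, b + 1) ∈ version then s else PySem.Set.add s (a + 1, b + 1)
  s

def voisinsPort (version : List (Int × Int)) : PySem.Set (Int × Int) :=
  version.foldl (voisinsStep version) PySem.Set.empty

-- loop body of the 'for e in l' loop of jouable (the elif chain appending to c)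
def collectStep (version : List (Int × Int)) (c : List (Int × Int)) (e : Int × Int) :
    List (Int × Int) :=
  if (e.1 - 1, e.2) ∈ version then c ++ [e]
  else if (e.1 + 1, e.2) ∈ version then c ++ [e]
  else if (e.1, e.2 - 1) ∈ version then c ++ [e]
  else if (e.1, e.2 + 1) ∈ version then c ++ [e]
  else c

def jouable (version : List (Int × Int)) : List (Int × Int) :=
  let l := voisinsPort version
  let c := l.foldl (collectStep version) []
  c.foldl PySem.Set.discard l

-- ===== PORT B =====
-- _diag_ok of Source B
def diagOk (version : List (Int × Int)) (d : Int × Int) : Bool :=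
  !decide (d ∈ version) && !decide ((d.1 - 1, d.2) ∈ version) && !decide ((d.1 + 1, d.2) ∈ version)
    && !decide ((d.1, d.2 - 1) ∈ version) && !decide ((d.1, d.2 + 1) ∈ version)

-- body of the 'for (a, b) in version' loop of Source B (inner loop over the four diagonals)
def altStep (version : List (Int × Int)) (res : PySem.Set (Int × Int)) (e : Int × Int) :
    PySem.Set (Int × Int) :=
  [(e.1 - 1, e.2 - 1), (e.1 - 1, e.2 + 1), (e.1 + 1, e.2 - 1), (e.1 + 1, e.2 + 1)].foldl
    (fun res d => if diagOk version d then PySem.Set.add res d else res) res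

def jouable_alt (version : List (Int × Int)) : List (Int × Int) :=
  version.foldl (altStep version) PySem.Set.empty

-- ===== PRECONDITION & SPEC =====
def Spec_jouable (version : List (Int × Int)) (out : List (Int × Int)) : Prop := out = jouable_alt version
instance (version : List (Int × Int)) (out : List (Int × Int)) : Decidable (Spec_jouable version out) := by unfold Spec_jouable; infer_instance

-- ===== CLAIM (what is proved, stated in full; the proofs are below) =====
def Claim_equal_jouable : Prop := ∀ (version : List (Int × Int)), Dom_jouable version → Spec_jouable version (jouable version)

-- ===== LEMMAS AND PROOFS =====

-- the elif chain of A's collecting loop appends e exactly when some orthogonal neighbor is occupied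
def orthTouch (version : List (Int × Int)) (e : Int × Int) : Bool :=
  decide ((e.1 - 1, e.2) ∈ version) || decide ((e.1 + 1, e.2) ∈ version)
    || decide ((e.1, e.2 - 1) ∈ version) || decide ((e.1, e.2 + 1) ∈ version)

lemma collectStep_eq (version : List (Int × Int)) (c : List (Int × Int)) (e : Int × Int) :
    collectStep version c e = if orthTouch version e then c ++ [e] else c := by
  simp only [collectStep, orthTouch]
  split_ifs <;> simp_all

lemma collect_eq (version l : List (Int × Int)) :
    l.foldl (collectStep version) [] = l.filter (orthTouch version) := by
  have h : collectStep version = fun acc x => if orthTouch version x then acc ++ [(fun y => y) x] else acc := by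
    funext c e; rw [collectStep_eq]
  rw [h, PySem.List.foldl_append_if]
  simp

lemma foldl_discard_eq (c : List (Int × Int)) : ∀ l : List (Int × Int),
    c.foldl PySem.Set.discard l = l.filter (fun y => !c.contains y) := by
  induction c with
  | nil => intro l; simp
  | cons x c ih =>
    intro l
    rw [List.foldl_cons]
    show c.foldl PySem.Set.discard (PySem.Set.discard l x) = _
    rw [ih]
    simp only [PySem.Set.discard, List.filter_filter]
    apply List.filter_congr
    intro y _
    by_cases hxy : y = x
    · subst hxy; simp
    · have hxy' : ¬x = y := fun h => hxy h.symm
      simp [hxy, hxy', Bool.not_or, Bool.and_comm]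

lemma diagOk_of_mem {version : List (Int × Int)} {x : Int × Int} (h : x ∈ version) :
    diagOk version x = false := by
  simp [diagOk, h]

lemma filter_set_add (p : (Int × Int) → Bool) (s : List (Int × Int)) (x : Int × Int) :
    (PySem.Set.add s x).filter p = if p x then PySem.Set.add (s.filter p) x else s.filter p := by
  simp only [PySem.Set.add, PySem.Set.contains]
  by_cases hm : x ∈ s <;> by_cases hp : p x <;>
    simp [hm, hp, List.filter_append, List.mem_filter]

lemma filter_guardAdd (version : List (Int × Int)) (s : List (Int × Int)) (x : Int × Int) :
    (if x ∈ version then s else PySem.Set.add s x).filter (diagOk version)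
      = if diagOk version x then PySem.Set.add (s.filter (diagOk version)) x
        else s.filter (diagOk version) := by
  by_cases h : x ∈ version
  · simp [h, diagOk_of_mem h]
  · simp [h, filter_set_add]

lemma diagOk_down {version : List (Int × Int)} {a b : Int} (h : (a, b) ∈ version) :
    diagOk version (a, b - 1) = false := by
  have hb : b - 1 + 1 = b := by ring
  simp [diagOk, hb, h]

lemma diagOk_up {version : List (Int × Int)} {a b : Int} (h : (a, b) ∈ version) :
    diagOk version (a, b + 1) = false := by
  have hb : b + 1 - 1 = b := by ring
  simp [diagOk, hb, h]

lemma diagOk_left {version : List (Int × Int)} {a b : Int} (h : (a, b) ∈ version) :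
    diagOk version (a - 1, b) = false := by
  have ha : a - 1 + 1 = a := by ring
  simp [diagOk, ha, h]

lemma diagOk_right {version : List (Int × Int)} {a b : Int} (h : (a, b) ∈ version) :
    diagOk version (a + 1, b) = false := by
  have ha : a + 1 - 1 = a := by ring
  simp [diagOk, ha, h]

lemma filter_step (version : List (Int × Int)) (e : Int × Int) (he : e ∈ version)
    (s : List (Int × Int)) :
    (voisinsStep version s e).filter (diagOk version)
      = altStep version (s.filter (diagOk version)) e := by
  obtain ⟨a, b⟩ := e
  simp only [voisinsStep, altStep, List.foldl_cons, List.foldl_nil]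
  simp only [filter_guardAdd, diagOk_down he, diagOk_up he, diagOk_left he, diagOk_right he,
    if_false, Bool.false_eq_true]

lemma fold_inv (version : List (Int × Int)) : ∀ (rest : List (Int × Int)),
    (∀ e ∈ rest, e ∈ version) → ∀ s : List (Int × Int),
    (rest.foldl (voisinsStep version) s).filter (diagOk version)
      = rest.foldl (altStep version) (s.filter (diagOk version)) := by
  intro rest
  induction rest with
  | nil => intro _ s; simp
  | cons e rest ih =>
    intro h s
    rw [List.foldl_cons, List.foldl_cons, ih (fun x hx => h x (List.mem_cons_of_mem _ hx)),
      filter_step version e (h e List.mem_cons_self)]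

lemma mem_guard {version s : List (Int × Int)} {x y : Int × Int}
    (h : y ∈ (if x ∈ version then s else PySem.Set.add s x)) : y ∈ s ∨ y ∉ version := by
  by_cases hv : x ∈ version
  · rw [if_pos hv] at h
    exact Or.inl h
  · rw [if_neg hv] at h
    simp only [PySem.Set.add, PySem.Set.contains] at h
    split at h
    · exact Or.inl h
    · rcases List.mem_append.mp h with h | h
      · exact Or.inl h
      · simp only [List.mem_singleton] at h
        subst h
        exact Or.inr hv

lemma mem_voisinsStep {version s : List (Int × Int)} {e x : Int × Int}
    (hx : x ∈ voisinsStep version s e) : x ∈ s ∨ x ∉ version := by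
  simp only [voisinsStep] at hx
  rcases mem_guard hx with hx | h
  rcases mem_guard hx with hx | h
  rcases mem_guard hx with hx | h
  rcases mem_guard hx with hx | h
  rcases mem_guard hx with hx | h
  rcases mem_guard hx with hx | h
  rcases mem_guard hx with hx | h
  rcases mem_guard hx with hx | h
  · exact Or.inl hx
  all_goals exact Or.inr h

lemma foldl_voisins_not_mem (version : List (Int × Int)) : ∀ (rest s : List (Int × Int)),
    (∀ y ∈ s, y ∉ version) → ∀ x ∈ rest.foldl (voisinsStep version) s, x ∉ version := by
  intro rest
  induction rest with
  | nil => intro s hs x hx; exact hs x hx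
  | cons e rest ih =>
    intro s hs x hx
    rw [List.foldl_cons] at hx
    exact ih _ (fun y hy => (mem_voisinsStep hy).elim (hs y) id) x hx

-- ===== VERDICT (by name: the statement is the Claim_ definition above) =====
theorem jouable_spec : Claim_equal_jouable := by
  intro version _
  unfold Spec_jouable jouable jouable_alt voisinsPort
  show List.foldl PySem.Set.discard
      (List.foldl (voisinsStep version) PySem.Set.empty version)
      (List.foldl (collectStep version) []
        (List.foldl (voisinsStep version) PySem.Set.empty version))
    = List.foldl (altStep version) PySem.Set.empty version
  rw [collect_eq, foldl_discard_eq]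
  have hnm : ∀ x ∈ version.foldl (voisinsStep version) PySem.Set.empty, x ∉ version :=
    foldl_voisins_not_mem version version PySem.Set.empty (by simp [PySem.Set.empty])
  have h1 : (version.foldl (voisinsStep version) PySem.Set.empty).filter
      (fun y => !((version.foldl (voisinsStep version) PySem.Set.empty).filter
        (orthTouch version)).contains y)
      = (version.foldl (voisinsStep version) PySem.Set.empty).filter (diagOk version) := by
    apply List.filter_congr
    intro y hy
    have hnv := hnm y hy
    have hy' : y ∈ List.foldl (voisinsStep version) [] version := hy
    simp [List.mem_filter, hy', diagOk, orthTouch, hnv, Bool.not_or]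
  rw [h1, fold_inv version version (fun _ h => h) PySem.Set.empty]
  rfl
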